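-- pv_equiv track=rewrite | github.com/Udog-ILLINOIS/BucketFly | backend/app.py | normalize_checklist_item
-- ===== SOURCE A (Python) =====
-- _F1TENTH_ITEMS = [
--     '1.1 Chassis Frame & Body',
--     '1.2 Wheels & Tires',
--     '2.1 Jetson Xavier NX (Compute)',
--     '2.2 LiDAR Unit',
--     '2.3 Power Distribution Board',
-- ]
--
-- _CAT_ITEMS = [
--     '1.1 Tires and Rims', '1.2 Bucket Cutting Edge, Tips, or Moldboard',
--     '1.3 Bucket Tilt Cylinders and Hoses', '1.4 Bucket, Lift Cylinders and Hoses',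
--     '1.5 Lift arm attachment to frame', '1.6 Underneath of Machine',
--     '1.7 Transmission and Transfer Gears', '1.8 Differential and Final Drive Oil',
--     '1.9 Steps and Handrails', '1.10 Brake Air Tank; inspect',
--     '1.11 Fuel Tank', '1.12 Axles- Final Drives, Differentials, Brakes, Duo-cone Seals',
--     '1.13 Hydraulic fluid tank, inspect', '1.14 Transmission Oil',
--     '1.15 Work Lights', '1.16 Battery & Cables',
--     '2.1 Engine Oil Level', '2.2 Engine Coolant Level',
--     '2.3 Check Radiator Cores for Debris', '2.4 Inspect Hoses for Cracks or Leaks',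
--     '2.5 Primary/secondary fuel filters', '2.6 All Belts',
--     '2.7 Air Cleaner and Air Filter Service Indicator', '2.8 Overall Engine Compartment',
--     '3.1 Steps & Handrails', '3.2 ROPS/FOPS',
--     '3.3 Fire Extinguisher', '3.4 Windshield wipers and washers',
--     '3.5 Side Doors', '4.1 Seat',
--     '4.2 Seat belt and mounting', '4.3 Horn',
--     '4.4 Backup Alarm', '4.5 Windows and Mirrors',
--     '4.6 Cab Air Filter', '4.7 Indicators & Gauges',
--     '4.8 Switch functionality', '4.9 Overall Cab Interior',
-- ]
--
-- def normalize_checklist_item(name: str, machine_type: str) -> str: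
--     """
--     Fuzzy-match an AI-returned item name to the exact canonical checklist key.
--
--     Priority order:
--       1. Exact match
--       2. Case-insensitive exact match
--       3. Strip numeric prefix from canonical item then compare (e.g. "Wheels & Tires" → "1.2 Wheels & Tires")
--       4. Substring containment (longer overlap wins)
--
--     Returns the original name unchanged if no match found.
--     """
--     if not name:
--         return name
--
--     items = _F1TENTH_ITEMS if machine_type == 'f1tenth' else _CAT_ITEMS
--     name_s = name.strip()
--     name_lower = name_s.lower()
--
--     # 1. Exact
--     for item in items:
--         if item == name_s:
--             return item
--
--     # 2. Case-insensitive exact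
--     for item in items:
--         if item.lower() == name_lower:
--             return item
--
--     # 3. Strip prefix — "1.2 Wheels & Tires" → compare "wheels & tires"
--     for item in items:
--         parts = item.split(' ', 1)
--         if len(parts) > 1 and parts[1].lower() == name_lower:
--             return item
--
--     # 4. Substring containment — pick the canonical item with the longest overlap
--     best, best_score = None, 0
--     for item in items:
--         item_lower = item.lower()
--         if name_lower in item_lower:
--             score = len(name_lower)
--         elif item_lower in name_lower:
--             score = len(item_lower)
--         else:
--             # keyword overlap: count matching words
--             item_words = set(item_lower.split())
--             name_words = set(name_lower.split())
--             score = len(item_words & name_words) * 3  # weight word matches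
--         if score > best_score:
--             best_score = score
--             best = item
--
--     if best and best_score >= 3:
--         return best
--
--     return name_s  # no confident match — return cleaned original
-- ===== SOURCE B (Python) =====
-- _F1TENTH_ITEMS = [
--     '1.1 Chassis Frame & Body',
--     '1.2 Wheels & Tires',
--     '2.1 Jetson Xavier NX (Compute)',
--     '2.2 LiDAR Unit',
--     '2.3 Power Distribution Board',
-- ]
--
-- _CAT_ITEMS = [
--     '1.1 Tires and Rims', '1.2 Bucket Cutting Edge, Tips, or Moldboard',
--     '1.3 Bucket Tilt Cylinders and Hoses', '1.4 Bucket, Lift Cylinders and Hoses',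
--     '1.5 Lift arm attachment to frame', '1.6 Underneath of Machine',
--     '1.7 Transmission and Transfer Gears', '1.8 Differential and Final Drive Oil',
--     '1.9 Steps and Handrails', '1.10 Brake Air Tank; inspect',
--     '1.11 Fuel Tank', '1.12 Axles- Final Drives, Differentials, Brakes, Duo-cone Seals',
--     '1.13 Hydraulic fluid tank, inspect', '1.14 Transmission Oil',
--     '1.15 Work Lights', '1.16 Battery & Cables',
--     '2.1 Engine Oil Level', '2.2 Engine Coolant Level',
--     '2.3 Check Radiator Cores for Debris', '2.4 Inspect Hoses for Cracks or Leaks',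
--     '2.5 Primary/secondary fuel filters', '2.6 All Belts',
--     '2.7 Air Cleaner and Air Filter Service Indicator', '2.8 Overall Engine Compartment',
--     '3.1 Steps & Handrails', '3.2 ROPS/FOPS',
--     '3.3 Fire Extinguisher', '3.4 Windshield wipers and washers',
--     '3.5 Side Doors', '4.1 Seat',
--     '4.2 Seat belt and mounting', '4.3 Horn',
--     '4.4 Backup Alarm', '4.5 Windows and Mirrors',
--     '4.6 Cab Air Filter', '4.7 Indicators & Gauges',
--     '4.8 Switch functionality', '4.9 Overall Cab Interior',
-- ]
--
--
-- def _substring_score(name_lower: str, item: str) -> int: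
--     """Substring containment / weighted word-overlap score of one item."""
--     item_lower = item.lower()
--     if name_lower in item_lower:
--         return len(name_lower)
--     if item_lower in name_lower:
--         return len(item_lower)
--     return len(set(item_lower.split()) & set(name_lower.split())) * 3
--
--
-- def _priority_key(name_s: str, name_lower: str, item: str):
--     """(tier, score): exact > ci-exact > prefix-stripped > substring/overlap."""
--     if item == name_s:
--         return (3, 0)
--     if item.lower() == name_lower:
--         return (2, 0)
--     parts = item.split(' ', 1)
--     if len(parts) > 1 and parts[1].lower() == name_lower:
--         return (1, 0)
--     return (0, _substring_score(name_lower, item))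
--
--
-- def normalize_checklist_item(name: str, machine_type: str) -> str:
--     """Single pass: rank every canonical item by a (tier, score) key, keep the
--     first lexicographic maximum; only the substring tier is gated by the >= 3
--     confidence threshold."""
--     if not name:
--         return name
--
--     items = _F1TENTH_ITEMS if machine_type == 'f1tenth' else _CAT_ITEMS
--     name_s = name.strip()
--     name_lower = name_s.lower()
--
--     best = None  # ((tier, score), item)
--     for item in items:
--         key = _priority_key(name_s, name_lower, item)
--         if best is None or key > best[0]:
--             best = (key, item)
--
--     if best is not None:
--         (tier, score), item = best
--         if tier > 0 or score >= 3:
--             return item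
--     return name_s
-- ===== Notes on version B (the rewrite author's own statement) =====
-- stated objective: alternative
-- what changed: Replaced A's four sequential scans over the checklist (exact, case-insensitive, prefix-stripped, substring/word-overlap) by a single pass that ranks each item with a lexicographic (tier, score) key and keeps the first strict maximum, gating only the substring tier by the >=3 threshold.
import Mathlib
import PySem

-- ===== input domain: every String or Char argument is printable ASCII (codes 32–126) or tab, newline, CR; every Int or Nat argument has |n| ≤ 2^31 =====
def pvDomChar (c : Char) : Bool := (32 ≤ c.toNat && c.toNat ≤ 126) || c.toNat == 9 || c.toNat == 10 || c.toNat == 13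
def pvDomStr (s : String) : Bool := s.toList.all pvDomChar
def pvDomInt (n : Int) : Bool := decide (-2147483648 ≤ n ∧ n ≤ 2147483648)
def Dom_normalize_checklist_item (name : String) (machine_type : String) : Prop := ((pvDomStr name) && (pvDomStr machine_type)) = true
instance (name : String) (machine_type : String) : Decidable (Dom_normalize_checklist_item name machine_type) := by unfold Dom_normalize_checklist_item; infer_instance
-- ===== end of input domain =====

-- One honest line: B replaces A's four sequential scans by a single pass ranking items
-- with a lexicographic (tier, score) key; same cost, different decomposition (objective: alternative).

-- ===== PORT A =====
def pvItemsF1 : List String := [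
  "1.1 Chassis Frame & Body",
  "1.2 Wheels & Tires",
  "2.1 Jetson Xavier NX (Compute)",
  "2.2 LiDAR Unit",
  "2.3 Power Distribution Board"]

def pvItemsCat : List String := [
  "1.1 Tires and Rims", "1.2 Bucket Cutting Edge, Tips, or Moldboard",
  "1.3 Bucket Tilt Cylinders and Hoses", "1.4 Bucket, Lift Cylinders and Hoses",
  "1.5 Lift arm attachment to frame", "1.6 Underneath of Machine",
  "1.7 Transmission and Transfer Gears", "1.8 Differential and Final Drive Oil",
  "1.9 Steps and Handrails", "1.10 Brake Air Tank; inspect",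
  "1.11 Fuel Tank", "1.12 Axles- Final Drives, Differentials, Brakes, Duo-cone Seals",
  "1.13 Hydraulic fluid tank, inspect", "1.14 Transmission Oil",
  "1.15 Work Lights", "1.16 Battery & Cables",
  "2.1 Engine Oil Level", "2.2 Engine Coolant Level",
  "2.3 Check Radiator Cores for Debris", "2.4 Inspect Hoses for Cracks or Leaks",
  "2.5 Primary/secondary fuel filters", "2.6 All Belts",
  "2.7 Air Cleaner and Air Filter Service Indicator", "2.8 Overall Engine Compartment",
  "3.1 Steps & Handrails", "3.2 ROPS/FOPS",
  "3.3 Fire Extinguisher", "3.4 Windshield wipers and washers",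
  "3.5 Side Doors", "4.1 Seat",
  "4.2 Seat belt and mounting", "4.3 Horn",
  "4.4 Backup Alarm", "4.5 Windows and Mirrors",
  "4.6 Cab Air Filter", "4.7 Indicators & Gauges",
  "4.8 Switch functionality", "4.9 Overall Cab Interior"]

-- parts = item.split(' ', 1); len(parts) > 1 and parts[1].lower() == name_lower
def pvPrefixMatch (nl : String) (item : String) : Bool :=
  match PySem.Str.splitMax? item " " 1 with
  | some (_ :: p1 :: _) => PySem.Str.lower p1 == nl
  | _ => false

-- the pass-4 score of one item (substring containment / weighted word overlap)
def pvScore4 (nl : String) (item : String) : Int :=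
  if PySem.Str.isIn nl (PySem.Str.lower item) then PySem.Str.len nl
  else if PySem.Str.isIn (PySem.Str.lower item) nl then PySem.Str.len (PySem.Str.lower item)
  else PySem.Set.len (PySem.Set.inter (PySem.Set.ofList (PySem.Str.split₀ (PySem.Str.lower item))) (PySem.Str.split₀ nl)) * 3

-- A's pass 4 loop step: (best, best_score) updated when score > best_score
def pvStepA (nl : String) (acc : Option String × Int) (item : String) : Option String × Int :=
  let score := pvScore4 nl item
  if acc.2 < score then (some item, score) else acc

-- the four sequential passes of A, after the common prelude
def pvRunA (items : List String) (name_s nl : String) : String :=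
  match items.find? (fun it => it == name_s) with
  | some it => it
  | none =>
    match items.find? (fun it => PySem.Str.lower it == nl) with
    | some it => it
    | none =>
      match items.find? (fun it => pvPrefixMatch nl it) with
      | some it => it
      | none =>
        let st := items.foldl (pvStepA nl) (none, 0)
        match st.1 with
        | some b => if b ≠ "" ∧ 3 ≤ st.2 then b else name_s   -- `if best and best_score >= 3`
        | none => name_s

def normalize_checklist_item (name : String) (machine_type : String) : String :=
  if name == "" then name
  else
    let items := if machine_type == "f1tenth" then pvItemsF1 else pvItemsCat
    let name_s := PySem.Str.strip name
    pvRunA items name_s (PySem.Str.lower name_s)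

-- ===== PORT B =====
-- B's priority key of an item: exact > ci-exact > prefix-stripped > substring/word-overlap
def pvKey (name_s nl : String) (item : String) : Nat × Int :=
  if item == name_s then (3, 0)
  else if PySem.Str.lower item == nl then (2, 0)
  else if pvPrefixMatch nl item then (1, 0)
  else (0, pvScore4 nl item)

-- Python tuple comparison `key > best[0]` on (tier, score)
def pvKeyGT (a b : Nat × Int) : Bool :=
  decide (b.1 < a.1) || (a.1 == b.1 && decide (b.2 < a.2))

-- B's single-pass loop step: keep the first lexicographic maximum
def pvStepB (name_s nl : String) (acc : Option ((Nat × Int) × String)) (item : String) :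
    Option ((Nat × Int) × String) :=
  let k := pvKey name_s nl item
  match acc with
  | none => some (k, item)
  | some (k0, _) => if pvKeyGT k k0 then some (k, item) else acc

def pvRunB (items : List String) (name_s nl : String) : String :=
  match items.foldl (pvStepB name_s nl) none with
  | some ((t, sc), it) => if 0 < t ∨ 3 ≤ sc then it else name_s
  | none => name_s

def normalize_checklist_item_alt (name : String) (machine_type : String) : String :=
  if name == "" then name
  else
    let items := if machine_type == "f1tenth" then pvItemsF1 else pvItemsCat
    let name_s := PySem.Str.strip name
    pvRunB items name_s (PySem.Str.lower name_s)

-- ===== PRECONDITION & SPEC =====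
def Spec_normalize_checklist_item (name : String) (machine_type : String) (out : String) : Prop := out = normalize_checklist_item_alt name machine_type
instance (name : String) (machine_type : String) (out : String) : Decidable (Spec_normalize_checklist_item name machine_type out) := by unfold Spec_normalize_checklist_item; infer_instance

-- ===== CLAIM (what is proved, stated in full; the proofs are below) =====
def Claim_equal_normalize_checklist_item : Prop := ∀ (name : String) (machine_type : String), Dom_normalize_checklist_item name machine_type → Spec_normalize_checklist_item name machine_type (normalize_checklist_item name machine_type)

-- ===== LEMMAS AND PROOFS =====

-- ---- facts about the priority key ----

theorem pvScore4_nonneg (nl it : String) : 0 ≤ pvScore4 nl it := by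
  unfold pvScore4
  split_ifs
  · simp [PySem.Str.len_eq]
  · simp [PySem.Str.len_eq]
  · have : (0:Int) ≤ PySem.Set.len (PySem.Set.inter (PySem.Set.ofList (PySem.Str.split₀ (PySem.Str.lower it))) (PySem.Str.split₀ nl)) := by
      unfold PySem.Set.len; exact Int.natCast_nonneg _
    omega

theorem pvKey_fst_le (ns nl it : String) : (pvKey ns nl it).1 ≤ 3 := by
  unfold pvKey; split_ifs <;> simp

theorem pvKey_fst_le_two (ns nl it : String) (h1 : (it == ns) = false) :
    (pvKey ns nl it).1 ≤ 2 := by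
  unfold pvKey; simp only [h1, Bool.false_eq_true, if_false]; split_ifs <;> simp

theorem pvKey_fst_le_one (ns nl it : String) (h1 : (it == ns) = false)
    (h2 : (PySem.Str.lower it == nl) = false) : (pvKey ns nl it).1 ≤ 1 := by
  unfold pvKey; simp only [h1, h2, Bool.false_eq_true, if_false]; split_ifs <;> simp

theorem pvKey_snd_of_fst_pos (ns nl it : String) (h : 0 < (pvKey ns nl it).1) :
    (pvKey ns nl it).2 = 0 := by
  revert h; unfold pvKey; split_ifs <;> simp

theorem pvKey_fst3 (ns nl it : String) :
    (((pvKey ns nl it).1 == 3)) = (it == ns) := by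
  unfold pvKey; split_ifs <;> simp_all

theorem pvKey_fst2 (ns nl it : String) (h1 : (it == ns) = false) :
    (((pvKey ns nl it).1 == 2)) = (PySem.Str.lower it == nl) := by
  unfold pvKey; simp only [h1, Bool.false_eq_true, if_false]
  split_ifs <;> simp_all

theorem pvKey_fst1 (ns nl it : String) (h1 : (it == ns) = false)
    (h2 : (PySem.Str.lower it == nl) = false) :
    (((pvKey ns nl it).1 == 1)) = pvPrefixMatch nl it := by
  unfold pvKey; simp only [h1, h2, Bool.false_eq_true, if_false]
  split_ifs <;> simp_all

theorem pvKey_sub (ns nl it : String) (h1 : (it == ns) = false)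
    (h2 : (PySem.Str.lower it == nl) = false) (h3 : pvPrefixMatch nl it = false) :
    pvKey ns nl it = (0, pvScore4 nl it) := by
  simp [pvKey, h1, h2, h3]

-- ---- facts about the lexicographic comparison ----

theorem pvGT_top (ns nl it : String) (t : Nat) (ht : 0 < t)
    (hle : (pvKey ns nl it).1 ≤ t) : pvKeyGT (pvKey ns nl it) (t, 0) = false := by
  rcases eq_or_lt_of_le hle with he | hlt
  · have hsnd : (pvKey ns nl it).2 = 0 := pvKey_snd_of_fst_pos ns nl it (he ▸ ht)
    simp [pvKeyGT, he, hsnd]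
  · simp only [pvKeyGT, Bool.or_eq_false_iff, decide_eq_false_iff_not, Bool.and_eq_false_iff,
      beq_eq_false_iff_ne, ne_eq]
    constructor
    · omega
    · left; omega

theorem pvGT_zero (s s' : Int) : pvKeyGT (0, s') (0, s) = decide (s < s') := by
  simp [pvKeyGT]

-- ---- B's fold: stays at / reaches the first maximal key ----

theorem pvStay (ns nl : String) (l : List String) (k0 : Nat × Int) (b0 : String)
    (h : ∀ it ∈ l, pvKeyGT (pvKey ns nl it) k0 = false) :
    l.foldl (pvStepB ns nl) (some (k0, b0)) = some (k0, b0) := by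
  induction l with
  | nil => rfl
  | cons x r ih =>
    have hx := h x (by simp)
    simp only [List.foldl_cons, pvStepB, hx, Bool.false_eq_true, if_false]
    exact ih (fun it hm => h it (by simp [hm]))

theorem pvReach (ns nl : String) (t : Nat) (ht : 0 < t) (l : List String) :
    ∀ (k0 : Nat × Int) (b0 e : String), k0.1 < t →
    (∀ it ∈ l, (pvKey ns nl it).1 ≤ t) →
    l.find? (fun it => (pvKey ns nl it).1 == t) = some e →
    l.foldl (pvStepB ns nl) (some (k0, b0)) = some ((t, 0), e) := by
  induction l with
  | nil => intro k0 b0 e _ _ hf; simp at hf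
  | cons x r ih =>
    intro k0 b0 e hk0 hle hf
    by_cases hx : (((pvKey ns nl x).1 == t)) = true
    · have he : x = e := by simpa [List.find?_cons, hx] using hf
      have hfst : (pvKey ns nl x).1 = t := by simpa using hx
      have hsnd : (pvKey ns nl x).2 = 0 := pvKey_snd_of_fst_pos ns nl x (hfst ▸ ht)
      have hkey : pvKey ns nl x = (t, 0) := by
        rw [Prod.ext_iff]; exact ⟨hfst, hsnd⟩
      have hgt : pvKeyGT (t, 0) k0 = true := by
        simp only [pvKeyGT, Bool.or_eq_true, decide_eq_true_eq]; left; exact hk0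
      simp only [List.foldl_cons, pvStepB, hkey, hgt, if_true]
      rw [he]
      exact pvStay ns nl r (t, 0) e
        (fun it hm => pvGT_top ns nl it t ht (hle it (by simp [hm])))
    · replace hf : List.find? (fun it => (pvKey ns nl it).1 == t) r = some e := by
        simpa [List.find?_cons, hx] using hf
      have hxlt : (pvKey ns nl x).1 < t := by
        have := hle x (by simp)
        have hne : (pvKey ns nl x).1 ≠ t := by simpa using hx
        omega
      have hle' : ∀ it ∈ r, (pvKey ns nl it).1 ≤ t := fun it hm => hle it (by simp [hm])
      by_cases hgt : pvKeyGT (pvKey ns nl x) k0 = true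
      · simp only [List.foldl_cons, pvStepB, hgt, if_true]
        exact ih (pvKey ns nl x) x e hxlt hle' hf
      · simp only [List.foldl_cons, pvStepB, Bool.not_eq_true] at hgt ⊢
        simp only [hgt, Bool.false_eq_true, if_false]
        exact ih k0 b0 e hk0 hle' hf

theorem pvTop (ns nl : String) (t : Nat) (ht : 0 < t) (l : List String) (e : String)
    (hle : ∀ it ∈ l, (pvKey ns nl it).1 ≤ t)
    (hf : l.find? (fun it => (pvKey ns nl it).1 == t) = some e) :
    l.foldl (pvStepB ns nl) none = some ((t, 0), e) := by
  cases l with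
  | nil => simp at hf
  | cons x r =>
    have step : (x :: r).foldl (pvStepB ns nl) none = r.foldl (pvStepB ns nl) (some (pvKey ns nl x, x)) := by
      simp [List.foldl_cons, pvStepB]
    rw [step]
    by_cases hx : (((pvKey ns nl x).1 == t)) = true
    · have he : x = e := by simpa [List.find?_cons, hx] using hf
      have hfst : (pvKey ns nl x).1 = t := by simpa using hx
      have hsnd : (pvKey ns nl x).2 = 0 := pvKey_snd_of_fst_pos ns nl x (hfst ▸ ht)
      have hkey : pvKey ns nl x = (t, 0) := by rw [Prod.ext_iff]; exact ⟨hfst, hsnd⟩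
      rw [hkey, he]
      exact pvStay ns nl r (t, 0) e
        (fun it hm => pvGT_top ns nl it t ht (hle it (by simp [hm])))
    · replace hf : List.find? (fun it => (pvKey ns nl it).1 == t) r = some e := by
        simpa [List.find?_cons, hx] using hf
      have hxlt : (pvKey ns nl x).1 < t := by
        have := hle x (by simp)
        have hne : (pvKey ns nl x).1 ≠ t := by simpa using hx
        omega
      exact pvReach ns nl t ht r (pvKey ns nl x) x e hxlt
        (fun it hm => hle it (by simp [hm])) hf

-- ---- the all-substring-tier case: relate B's fold to A's pass-4 fold ----

def pvRel (bB : Option ((Nat × Int) × String)) (bA : Option String × Int) : Prop :=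
  (∃ x, bB = some ((0, (0:Int)), x) ∧ bA = (none, 0)) ∨
  (∃ b s, 0 < s ∧ b ≠ "" ∧ bB = some ((0, s), b) ∧ bA = (some b, s))

theorem pvZ (ns nl : String) (l : List String)
    (hk : ∀ it ∈ l, pvKey ns nl it = (0, pvScore4 nl it))
    (hne : ∀ it ∈ l, it ≠ "") :
    ∀ bB bA, pvRel bB bA → pvRel (l.foldl (pvStepB ns nl) bB) (l.foldl (pvStepA nl) bA) := by
  induction l with
  | nil => intro bB bA h; exact h
  | cons x r ih =>
    intro bB bA h
    simp only [List.foldl_cons]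
    apply ih (fun it hm => hk it (by simp [hm])) (fun it hm => hne it (by simp [hm]))
    have hkx : pvKey ns nl x = (0, pvScore4 nl x) := hk x (by simp)
    have hnex : x ≠ "" := hne x (by simp)
    rcases h with ⟨x0, hB, hA⟩ | ⟨b, s, hs, hbne, hB, hA⟩
    · subst hB; subst hA
      simp only [pvStepB, pvStepA, hkx, pvGT_zero]
      by_cases hpos : (0:Int) < pvScore4 nl x
      · simp only [hpos, decide_true, if_true]
        exact Or.inr ⟨x, pvScore4 nl x, hpos, hnex, rfl, rfl⟩
      · simp only [hpos, decide_false, Bool.false_eq_true, if_false]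
        exact Or.inl ⟨x0, rfl, rfl⟩
    · subst hB; subst hA
      simp only [pvStepB, pvStepA, hkx, pvGT_zero]
      by_cases hlt : s < pvScore4 nl x
      · simp only [hlt, decide_true, if_true]
        exact Or.inr ⟨x, pvScore4 nl x, by omega, hnex, rfl, rfl⟩
      · simp only [hlt, decide_false, Bool.false_eq_true, if_false]
        exact Or.inr ⟨b, s, hs, hbne, rfl, rfl⟩

-- ---- member-wise find? congruence (predicates agreeing on the list) ----

theorem pvFind_congr (l : List String) (p q : String → Bool)
    (h : ∀ x ∈ l, p x = q x) : l.find? p = l.find? q := by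
  induction l with
  | nil => rfl
  | cons x r ih =>
    rw [List.find?_cons, List.find?_cons, h x (by simp)]
    cases q x
    · exact ih (fun y hm => h y (by simp [hm]))
    · rfl

-- ---- main equivalence, for any nonempty item list without the empty string ----

theorem pv_main (items : List String) (name_s nl : String)
    (hne : ∀ it ∈ items, it ≠ "") (hcons : items ≠ []) :
    pvRunA items name_s nl = pvRunB items name_s nl := by
  unfold pvRunA pvRunB
  rcases hE : items.find? (fun it => it == name_s) with _ | e
  case some =>
    have hf : items.find? (fun it => (pvKey name_s nl it).1 == 3) = some e := by
      rw [pvFind_congr items _ _ (fun it _ => pvKey_fst3 name_s nl it)]; exact hE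
    rw [pvTop name_s nl 3 (by omega) items e (fun it _ => pvKey_fst_le name_s nl it) hf]
    simp
  case none =>
    have hEall : ∀ it ∈ items, (it == name_s) = false := by
      intro it hm; simpa using List.find?_eq_none.mp hE it hm
    rcases hC : items.find? (fun it => PySem.Str.lower it == nl) with _ | c
    case some =>
      have hf : items.find? (fun it => (pvKey name_s nl it).1 == 2) = some c := by
        rw [pvFind_congr items _ _ (fun it hm => pvKey_fst2 name_s nl it (hEall it hm))]
        exact hC
      rw [pvTop name_s nl 2 (by omega) items c
        (fun it hm => pvKey_fst_le_two name_s nl it (hEall it hm)) hf]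
      simp
    case none =>
      have hCall : ∀ it ∈ items, (PySem.Str.lower it == nl) = false := by
        intro it hm; simpa using List.find?_eq_none.mp hC it hm
      rcases hP : items.find? (fun it => pvPrefixMatch nl it) with _ | p
      case some =>
        have hf : items.find? (fun it => (pvKey name_s nl it).1 == 1) = some p := by
          rw [pvFind_congr items _ _
            (fun it hm => pvKey_fst1 name_s nl it (hEall it hm) (hCall it hm))]
          exact hP
        rw [pvTop name_s nl 1 (by omega) items p
          (fun it hm => pvKey_fst_le_one name_s nl it (hEall it hm) (hCall it hm)) hf]
        simp
      case none =>
        have hPall : ∀ it ∈ items, pvPrefixMatch nl it = false := by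
          intro it hm; simpa using List.find?_eq_none.mp hP it hm
        have hk : ∀ it ∈ items, pvKey name_s nl it = (0, pvScore4 nl it) :=
          fun it hm => pvKey_sub name_s nl it (hEall it hm) (hCall it hm) (hPall it hm)
        cases items with
        | nil => exact absurd rfl hcons
        | cons x r =>
          have hkx : pvKey name_s nl x = (0, pvScore4 nl x) := hk x (by simp)
          have hnex : x ≠ "" := hne x (by simp)
          have hrel0 : pvRel ((x :: r).foldl (pvStepB name_s nl) none)
              ((x :: r).foldl (pvStepA nl) (none, 0)) := by
            simp only [List.foldl_cons]
            apply pvZ name_s nl r (fun it hm => hk it (by simp [hm]))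
              (fun it hm => hne it (by simp [hm]))
            simp only [pvStepB, pvStepA, hkx]
            by_cases hpos : (0:Int) < pvScore4 nl x
            · simp only [hpos, if_true]
              exact Or.inr ⟨x, pvScore4 nl x, hpos, hnex, rfl, rfl⟩
            · have h0 : pvScore4 nl x = 0 := le_antisymm (by omega) (pvScore4_nonneg nl x)
              simp only [h0]
              exact Or.inl ⟨x, rfl, rfl⟩
          rcases hrel0 with ⟨x0, hB, hA⟩ | ⟨b, s, hs, hbne, hB, hA⟩
          · rw [hB, hA]; simp
          · rw [hB, hA]
            by_cases h3 : (3:Int) ≤ s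
            · simp [h3, hbne]
            · simp [h3, hbne]

-- ===== VERDICT (by name: the statement is the Claim_ definition above) =====
theorem normalize_checklist_item_spec : Claim_equal_normalize_checklist_item := by
  intro name machine_type _
  unfold Spec_normalize_checklist_item normalize_checklist_item normalize_checklist_item_alt
  cases h : (name == "") with
  | true => simp
  | false =>
    simp only [Bool.false_eq_true, if_false]
    cases hmt : (machine_type == "f1tenth") with
    | false =>
      simp only [Bool.false_eq_true, if_false]
      exact pv_main pvItemsCat _ _ (by decide) (by decide)
    | true =>
      simp only [if_true]
      exact pv_main pvItemsF1 _ _ (by decide) (by decide)
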